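-- pv_equiv track=rewrite | github.com/oritaty/CodingBat | python/string2.py | xyz_there
-- ===== SOURCE A (Python) =====
-- def xyz_there(str):
--   if str == "xyz" or str[0 : 3] == "xyz":
--     return True
--   cnt = 1
--   while cnt < len(str):
--     if str[cnt : cnt + 3] == "xyz" and str[cnt - 1 : cnt] != ".":
--       return True
--     cnt += 1
--   return False
-- ===== SOURCE B (Python) =====
-- def xyz_there(str):
--   i = str.find("xyz")
--   while i != -1:
--     if i == 0 or str[i - 1] != ".":
--       return True
--     i = str.find("xyz", i + 1)
--   return False
-- ===== Notes on version B (the rewrite author's own statement) =====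
-- stated objective: faster
-- what changed: Replaces A's per-index slice test over every position with a scan that jumps between occurrences located by str.find, filtering out those preceded by a dot.
import Mathlib
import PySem

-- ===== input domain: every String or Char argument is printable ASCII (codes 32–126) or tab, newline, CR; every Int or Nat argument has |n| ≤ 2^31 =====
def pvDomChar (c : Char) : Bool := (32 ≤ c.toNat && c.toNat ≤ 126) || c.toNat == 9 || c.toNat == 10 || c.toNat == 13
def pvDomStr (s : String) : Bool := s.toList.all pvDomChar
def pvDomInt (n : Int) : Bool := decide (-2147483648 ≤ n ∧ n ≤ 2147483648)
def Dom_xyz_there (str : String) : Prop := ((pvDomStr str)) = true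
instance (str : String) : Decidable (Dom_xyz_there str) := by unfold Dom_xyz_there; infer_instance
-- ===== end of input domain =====

-- B replaces the per-index slice test with a scan over the occurrences located by str.find; return values are identical.

-- ===== PORT A =====
-- while cnt < len(str): test str[cnt:cnt+3] == "xyz" and str[cnt-1:cnt] != "."
def xyzAloop (cs : List Char) (cnt : Nat) : Bool :=
  if cnt < cs.length then
    if PySem.Chars.slice cs (some (cnt : Int)) (some ((cnt : Int) + 3)) = ['x', 'y', 'z'] ∧
       PySem.Chars.slice cs (some ((cnt : Int) - 1)) (some (cnt : Int)) ≠ ['.'] then true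
    else xyzAloop cs (cnt + 1)
  else false
termination_by cs.length - cnt

def xyz_there (str : String) : Bool :=
  if str = "xyz" ∨ PySem.Chars.slice str.toList (some 0) (some 3) = ['x', 'y', 'z'] then true
  else xyzAloop str.toList 1

-- ===== PORT B =====
-- while i != -1: if i == 0 or str[i-1] != ".": return True; i = str.find("xyz", i+1)
-- fuel only guards totality (each step strictly increases i, so cs.length + 1 steps always suffice)
def xyzBloop (cs : List Char) (fuel : Nat) (i : Int) : Bool :=
  if i = -1 then false
  else if i = 0 ∨ PySem.Chars.pyGet? cs (i - 1) ≠ some '.' then true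
  else match fuel with
    | 0 => false
    | fuel + 1 => xyzBloop cs fuel (PySem.Chars.findFrom cs ['x', 'y', 'z'] (i + 1) none)

def xyz_there_alt (str : String) : Bool :=
  xyzBloop str.toList (str.toList.length + 1) (PySem.Chars.find str.toList ['x', 'y', 'z'])

-- ===== PRECONDITION & SPEC =====
def Spec_xyz_there (str : String) (out : Bool) : Prop := out = xyz_there_alt str
instance (str : String) (out : Bool) : Decidable (Spec_xyz_there str out) := by unfold Spec_xyz_there; infer_instance

-- ===== CLAIM (what is proved, stated in full; the proofs are below) =====
def Claim_equal_xyz_there : Prop := ∀ (str : String), Dom_xyz_there str → Spec_xyz_there str (xyz_there str)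

-- ===== LEMMAS AND PROOFS =====
-- an occurrence of "xyz" at position j
def OccAt (cs : List Char) (j : Nat) : Prop := ['x', 'y', 'z'] <+: cs.drop j
-- an occurrence that counts: at position 0, or not preceded by '.'
def GoodAt (cs : List Char) (j : Nat) : Prop := OccAt cs j ∧ (j = 0 ∨ cs[j - 1]? ≠ some '.')

lemma occAt_add_le (cs : List Char) (j : Nat) (h : OccAt cs j) : j + 3 ≤ cs.length := by
  have := h.length_le
  simp [List.length_drop] at this
  omega

lemma slice3_iff (cs : List Char) (cnt : Nat) :
    PySem.Chars.slice cs (some (cnt : Int)) (some ((cnt : Int) + 3)) = ['x', 'y', 'z'] ↔ OccAt cs cnt := by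
  have e : PySem.Chars.slice cs (some (cnt : Int)) (some ((cnt : Int) + 3)) = (cs.drop cnt).take 3 := by
    rw [PySem.Chars.slice_eq_listSlice, PySem.List.slice_toNat]
    · congr 1
      omega
    · omega
    · omega
  rw [e, OccAt, List.prefix_iff_eq_take]
  constructor <;> (intro h; exact h.symm)

lemma slice1_iff (cs : List Char) (cnt : Nat) (h1 : 1 ≤ cnt) (h2 : cnt ≤ cs.length) :
    PySem.Chars.slice cs (some ((cnt : Int) - 1)) (some (cnt : Int)) = ['.'] ↔ cs[cnt - 1]? = some '.' := by
  have e : (cnt : Int) - 1 = ((cnt - 1 : Nat) : Int) := by omega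
  have e2 : PySem.Chars.slice cs (some ((cnt : Int) - 1)) (some (cnt : Int)) = (cs.drop (cnt - 1)).take 1 := by
    rw [PySem.Chars.slice_eq_listSlice, e, PySem.List.slice_toNat]
    · simp; congr 1; omega
    · omega
    · omega
  have hlt : cnt - 1 < cs.length := by omega
  rw [e2, List.drop_eq_getElem_cons hlt,
      show List.take 1 (cs[cnt - 1] :: List.drop (cnt - 1 + 1) cs) = [cs[cnt - 1]] from rfl]
  simp [List.getElem?_eq_getElem hlt]

lemma xyzAloop_iff (cs : List Char) (cnt : Nat) (h1 : 1 ≤ cnt) :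
    xyzAloop cs cnt = true ↔ ∃ j, cnt ≤ j ∧ OccAt cs j ∧ cs[j - 1]? ≠ some '.' := by
  by_cases hlen : cnt < cs.length
  · rw [xyzAloop, if_pos hlen]
    by_cases hc : PySem.Chars.slice cs (some (cnt : Int)) (some ((cnt : Int) + 3)) = ['x', 'y', 'z'] ∧
        PySem.Chars.slice cs (some ((cnt : Int) - 1)) (some (cnt : Int)) ≠ ['.']
    · rw [if_pos hc]
      simp only [true_iff]
      exact ⟨cnt, le_refl _, (slice3_iff cs cnt).mp hc.1,
        fun hdot => hc.2 ((slice1_iff cs cnt h1 (by omega)).mpr hdot)⟩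
    · rw [if_neg hc]
      rw [xyzAloop_iff cs (cnt + 1) (by omega)]
      constructor
      · rintro ⟨j, hj, hocc, hdot⟩; exact ⟨j, by omega, hocc, hdot⟩
      · rintro ⟨j, hj, hocc, hdot⟩
        refine ⟨j, ?_, hocc, hdot⟩
        rcases Nat.lt_or_ge cnt j with h | h
        · omega
        · exfalso
          have hje : j = cnt := by omega
          subst hje
          exact hc ⟨(slice3_iff cs j).mpr hocc,
            fun hsl => hdot ((slice1_iff cs j h1 (by omega)).mp hsl)⟩
  · rw [xyzAloop, if_neg hlen]
    simp only [Bool.false_eq_true, false_iff, not_exists]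
    rintro j ⟨hj, hocc, -⟩
    have := occAt_add_le cs j hocc
    omega
termination_by cs.length - cnt

lemma prefix_drop_infix (cs l : List Char) (k j : Nat) (hkj : k ≤ j) (h : l <+: cs.drop j) :
    l <:+: cs.drop k := by
  have e : cs.drop j = (cs.drop k).drop (j - k) := by
    rw [List.drop_drop]; congr 1; omega
  rw [e] at h
  exact h.isInfix.trans ((cs.drop k).drop_suffix (j - k)).isInfix

lemma xyzBloop_iff (cs : List Char) (fuel k : Nat) (hk : k ≤ cs.length)
    (hf : cs.length + 1 - k ≤ fuel) :
    xyzBloop cs fuel (PySem.Chars.findFrom cs ['x', 'y', 'z'] (k : Int) none) = true ↔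
      ∃ j, k ≤ j ∧ GoodAt cs j := by
  induction fuel generalizing k with
  | zero => omega
  | succ fuel ih =>
    by_cases hm : PySem.Chars.findFrom cs ['x', 'y', 'z'] (k : Int) none = -1
    · rw [xyzBloop, if_pos hm]
      simp only [Bool.false_eq_true, false_iff, not_exists]
      rintro j ⟨hj, hocc, -⟩
      exact ((PySem.Chars.findFrom_natCast_eq_neg_one_iff cs ['x', 'y', 'z'] k hk).mp hm)
        (prefix_drop_infix cs _ k j hj hocc)
    · obtain ⟨hkm, hocc, hmin⟩ := PySem.Chars.findFrom_natCast_spec cs ['x', 'y', 'z'] k hk hm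
      set m := PySem.Chars.findFrom cs ['x', 'y', 'z'] (k : Int) none with hmdef
      have hm0 : 0 ≤ m := le_trans (by omega) hkm
      have hkM : k ≤ m.toNat := by omega
      have hmlen : m.toNat + 3 ≤ cs.length := occAt_add_le cs m.toNat hocc
      rw [xyzBloop, if_neg hm]
      by_cases hc : m = 0 ∨ PySem.Chars.pyGet? cs (m - 1) ≠ some '.'
      · rw [if_pos hc]
        simp only [true_iff]
        refine ⟨m.toNat, by omega, hocc, ?_⟩
        by_cases hz : m = 0
        · left; omega
        · right
          rcases hc with hc | hc
          · exact absurd hc hz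
          · intro hdot2
            apply hc
            have e1 : m - 1 = ((m.toNat - 1 : Nat) : Int) := by omega
            rw [e1, PySem.Chars.pyGet?_eq_listPyGet?, PySem.List.pyGet?_natCast]
            exact hdot2
      · rw [if_neg hc]
        rw [not_or, not_not] at hc
        obtain ⟨hm1, hdot⟩ := hc
        rw [PySem.Chars.pyGet?_eq_listPyGet?,
            show m - 1 = ((m.toNat - 1 : Nat) : Int) by omega,
            PySem.List.pyGet?_natCast] at hdot
        rw [show m + 1 = ((m.toNat + 1 : Nat) : Int) by omega,
            ih (m.toNat + 1) (by omega) (by omega)]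
        constructor
        · rintro ⟨j, hj, hg⟩; exact ⟨j, by omega, hg⟩
        · rintro ⟨j, hj, hoccj, hok⟩
          refine ⟨j, ?_, hoccj, hok⟩
          rcases Nat.lt_or_ge j m.toNat with h | h
          · exact absurd hoccj (hmin j hj h)
          · rcases Nat.eq_or_lt_of_le h with h | h
            · exfalso
              rcases hok with h0 | hne
              · omega
              · exact hne (h ▸ hdot)
            · omega

theorem A_iff (str : String) :
    xyz_there str = true ↔ ∃ j, GoodAt str.toList j := by
  rw [xyz_there]
  by_cases hc : str = "xyz" ∨ PySem.Chars.slice str.toList (some 0) (some 3) = ['x', 'y', 'z']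
  · rw [if_pos hc]
    simp only [true_iff]
    have hocc : OccAt str.toList 0 := by
      apply (slice3_iff str.toList 0).mp
      rcases hc with hc | hc
      · subst hc; decide
      · simpa using hc
    exact ⟨0, hocc, Or.inl rfl⟩
  · rw [if_neg hc]
    rw [xyzAloop_iff str.toList 1 le_rfl]
    constructor
    · rintro ⟨j, hj, hocc, hdot⟩; exact ⟨j, hocc, Or.inr hdot⟩
    · rintro ⟨j, hocc, hok⟩
      by_cases h0 : j = 0
      · exfalso
        apply hc
        right
        subst h0
        simpa using (slice3_iff str.toList 0).mpr hocc
      · refine ⟨j, by omega, hocc, ?_⟩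
        rcases hok with h | h
        · exact absurd h h0
        · exact h

theorem B_iff (str : String) :
    xyz_there_alt str = true ↔ ∃ j, GoodAt str.toList j := by
  rw [xyz_there_alt, ← PySem.Chars.findFrom_zero,
      show (0 : Int) = ((0 : Nat) : Int) by rfl,
      xyzBloop_iff str.toList (str.toList.length + 1) 0 (by omega) (by omega)]
  simp

-- ===== VERDICT (by name: the statement is the Claim_ definition above) =====
theorem xyz_there_spec : Claim_equal_xyz_there := by
  intro str _
  unfold Spec_xyz_there
  exact Bool.coe_iff_coe.mp ((A_iff str).trans (B_iff str).symm)
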